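-- pv_equiv track=rewrite | github.com/SmartTasksOrg/IAISO | IAIso-v5.0/core/iaiso-python/iaiso/consent/__init__.py | _scope_granted
-- ===== SOURCE A (Python) =====
-- def _scope_granted(granted: list[str], requested: str) -> bool:
--     if not requested:
--         raise ValueError("requested scope must be non-empty")
--     for g in granted:
--         if g == requested:
--             return True
--         if requested.startswith(g + "."):
--             return True
--     return False
-- ===== SOURCE B (Python) =====
-- def _scope_granted(granted: list[str], requested: str) -> bool:
--     if not requested:
--         raise ValueError("requested scope must be non-empty")
--     gset = set(granted)
--     n = len(requested)
--     # a grant matches iff it equals requested or is a prefix cut at a dot: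
--     # check every dot-boundary prefix of requested (and requested itself) for membership
--     return any(requested[:i] in gset
--                for i in range(n + 1)
--                if i == n or requested[i] == '.')
-- ===== Notes on version B (the rewrite author's own statement) =====
-- stated objective: alternative
-- what changed: Instead of scanning granted and testing each grant with startswith, B builds a set of granted once and enumerates the dot-boundary prefixes of requested (and requested itself), returning True iff any is in the set.
import Mathlib
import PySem

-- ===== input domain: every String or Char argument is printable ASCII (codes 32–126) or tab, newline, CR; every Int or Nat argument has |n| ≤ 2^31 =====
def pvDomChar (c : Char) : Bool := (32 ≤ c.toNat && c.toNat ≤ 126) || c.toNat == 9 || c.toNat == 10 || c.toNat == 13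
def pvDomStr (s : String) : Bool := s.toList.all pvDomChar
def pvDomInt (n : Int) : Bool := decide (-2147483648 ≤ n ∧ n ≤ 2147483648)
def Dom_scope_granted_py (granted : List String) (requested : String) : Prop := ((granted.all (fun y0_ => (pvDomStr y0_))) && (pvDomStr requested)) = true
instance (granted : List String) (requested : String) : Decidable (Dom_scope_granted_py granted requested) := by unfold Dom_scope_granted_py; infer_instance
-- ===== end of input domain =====

-- B replaces A's scan of granted with startswith tests by one set of granted plus
-- membership tests of requested's dot-boundary prefixes (alternative decomposition, same cost class).

-- ===== PORT A =====
-- the 'for g in granted' loop: return True on equality or dotted-prefix match, else continue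
def scopeLoopA (granted : List String) (requested : String) : Bool :=
  match granted with
  | [] => false
  | g :: rest =>
    if g = requested then true
    else if PySem.Str.startswith requested (g ++ ".") then true
    else scopeLoopA rest requested

def scope_granted_py (granted : List String) (requested : String) : Bool :=
  if requested = "" then false   -- Python raises ValueError here; excluded by Pre_
  else scopeLoopA granted requested

-- ===== PORT B =====
def scope_granted_py_alt (granted : List String) (requested : String) : Bool :=
  if requested = "" then false   -- Python raises ValueError here; excluded by Pre_
  else
    let gset : PySem.Set String := PySem.Set.ofList granted
    let cs := requested.toList
    let n := cs.length
    (List.range (n + 1)).any (fun i =>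
      (i == n || cs[i]? == some '.') && PySem.Set.contains gset (String.ofList (cs.take i)))

-- ===== PRECONDITION & SPEC =====
-- Pre_ excludes exactly the inputs on which A raises ValueError (empty requested).
def Pre_scope_granted_py (granted : List String) (requested : String) : Prop := requested ≠ ""
instance (granted : List String) (requested : String) : Decidable (Pre_scope_granted_py granted requested) := by unfold Pre_scope_granted_py; infer_instance
def pvWitness_scope_granted_py : List String × String := (["iam", "billing.read"], "iam.users.list")

def Spec_scope_granted_py (granted : List String) (requested : String) (out : Bool) : Prop := out = scope_granted_py_alt granted requested
instance (granted : List String) (requested : String) (out : Bool) : Decidable (Spec_scope_granted_py granted requested out) := by unfold Spec_scope_granted_py; infer_instance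

-- ===== CLAIM (what is proved, stated in full; the proofs are below) =====
def Claim_equal_scope_granted_py : Prop := ∀ (granted : List String) (requested : String), Dom_scope_granted_py granted requested → Pre_scope_granted_py granted requested → Spec_scope_granted_py granted requested (scope_granted_py granted requested)

-- ===== LEMMAS AND PROOFS =====

theorem scopeLoopA_iff (granted : List String) (r : String) :
    scopeLoopA granted r = true ↔ ∃ g ∈ granted, g = r ∨ (g.toList ++ ['.']) <+: r.toList := by
  induction granted with
  | nil => simp [scopeLoopA]
  | cons g rest ih =>
    simp only [scopeLoopA, List.mem_cons]
    split_ifs with h1 h2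
    · simp [h1]
    · constructor
      · intro _
        refine ⟨g, Or.inl rfl, Or.inr ?_⟩
        have := (PySem.Chars.startswith_iff (r.toList) ((g ++ ".").toList)).mp (by simpa using h2)
        simpa using this
      · intro _; rfl
    · rw [ih]
      constructor
      · rintro ⟨g', hg', hp⟩; exact ⟨g', Or.inr hg', hp⟩
      · rintro ⟨g', hg' | hg', hp⟩
        · subst hg'
          rcases hp with hp | hp
          · exact absurd hp h1
          · exfalso; apply h2
            simp only [PySem.Str.startswith_eq]
            rw [PySem.Chars.startswith_iff]
            simpa using hp
        · exact ⟨g', hg', hp⟩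

-- a string matches as a grant iff it is a dot-boundary prefix of r (or r itself)
theorem prefix_char_iff (r : String) (s : String) :
    (s = r ∨ (s.toList ++ ['.']) <+: r.toList) ↔
      ∃ i, i < r.toList.length + 1 ∧ (i = r.toList.length ∨ r.toList[i]? = some '.') ∧
        r.toList.take i = s.toList := by
  constructor
  · rintro (rfl | hp)
    · exact ⟨s.toList.length, by omega, Or.inl rfl, by simp⟩
    · obtain ⟨t, ht⟩ := hp
      have ht' : s.toList ++ ('.' :: t) = r.toList := by simpa using ht
      have hlen : r.toList.length = s.toList.length + 1 + t.length := by
        rw [← ht']; simp; omega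
      refine ⟨s.toList.length, by omega, Or.inr ?_, ?_⟩
      · rw [← ht', List.getElem?_append_right (Nat.le_refl _)]
        simp
      · rw [← ht', List.take_left]
  · rintro ⟨i, hlt, hcond, htake⟩
    rcases hcond with rfl | hdot
    · left
      have : r.toList = s.toList := by rw [← htake]; simp
      exact String.toList_inj.mp this.symm
    · right
      have hi : i < r.toList.length := by
        rcases List.getElem?_eq_some_iff.mp hdot with ⟨h, _⟩
        exact h
      have htk : r.toList.take (i+1) = s.toList ++ ['.'] := by
        rw [List.take_add_one, htake, hdot]
        simp
      rw [← htk]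
      exact List.take_prefix _ _

theorem alt_iff (granted : List String) (r : String) (h : r ≠ "") :
    scope_granted_py_alt granted r = true ↔
      ∃ i, i < r.toList.length + 1 ∧ (i = r.toList.length ∨ r.toList[i]? = some '.') ∧
        String.ofList (r.toList.take i) ∈ granted := by
  simp only [scope_granted_py_alt, if_neg h, List.any_eq_true, List.mem_range,
    Bool.and_eq_true, Bool.or_eq_true, beq_iff_eq]
  constructor
  · rintro ⟨i, hi, hc, hmem⟩
    exact ⟨i, hi, hc, by simpa [PySem.Set.contains_iff, PySem.Set.mem_ofList] using hmem⟩
  · rintro ⟨i, hi, hc, hmem⟩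
    exact ⟨i, hi, hc, by simpa [PySem.Set.contains_iff, PySem.Set.mem_ofList] using hmem⟩

theorem main_eq (granted : List String) (r : String) (h : r ≠ "") :
    scope_granted_py granted r = scope_granted_py_alt granted r := by
  rw [scope_granted_py, if_neg h]
  rw [Bool.eq_iff_iff, scopeLoopA_iff, alt_iff granted r h]
  constructor
  · rintro ⟨g, hg, hp⟩
    obtain ⟨i, h1, h2, h3⟩ := (prefix_char_iff r g).mp hp
    refine ⟨i, h1, h2, ?_⟩
    rw [h3, String.ofList_toList]
    exact hg
  · rintro ⟨i, h1, h2, h3⟩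
    exact ⟨_, h3, (prefix_char_iff r _).mpr ⟨i, h1, h2, by simp⟩⟩

-- ===== VERDICT (by name: the statement is the Claim_ definition above) =====
theorem scope_granted_py_spec : Claim_equal_scope_granted_py := by
  intro granted requested _ hpre
  unfold Spec_scope_granted_py
  exact main_eq granted requested hpre
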